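-- pv_equiv track=rewrite | github.com/helioncneto/AdvancedProg | prog_arquivo2.py | guarda_letra
-- ===== SOURCE A (Python) =====
-- def guarda_letra(string):
--     L = []
--     for i in range(len(string)):
--         if string[i] == "a" or string[i] == "e" or string[i] == "i" or string[i] == "o" or string[i] == "u":
--             if i >=3:
--                 L.append([string[i - 1], string[i - 2], string[i - 3]])
--             elif i >= 2:
--                 L.append([string[i-1], string[i-2]])
--             elif i >=1:
--                 L.append([string[i - 1]])
--
--     return L
-- ===== SOURCE B (Python) =====
-- def guarda_letra(string):
--     L = []
--     buf = []  # rolling window: up to 3 most recent characters, oldest first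
--     for ch in string:
--         if ch in "aeiou" and buf:
--             L.append(list(reversed(buf)))
--         buf = (buf + [ch])[-3:]
--     return L
-- ===== Notes on version B (the rewrite author's own statement) =====
-- stated objective: simpler
-- what changed: Replaces the index-arithmetic i>=3/i>=2/i>=1 elif ladder and repeated string indexing with a single pass that maintains a rolling window of the last three characters, appending the reversed window at each vowel.
import Mathlib
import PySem

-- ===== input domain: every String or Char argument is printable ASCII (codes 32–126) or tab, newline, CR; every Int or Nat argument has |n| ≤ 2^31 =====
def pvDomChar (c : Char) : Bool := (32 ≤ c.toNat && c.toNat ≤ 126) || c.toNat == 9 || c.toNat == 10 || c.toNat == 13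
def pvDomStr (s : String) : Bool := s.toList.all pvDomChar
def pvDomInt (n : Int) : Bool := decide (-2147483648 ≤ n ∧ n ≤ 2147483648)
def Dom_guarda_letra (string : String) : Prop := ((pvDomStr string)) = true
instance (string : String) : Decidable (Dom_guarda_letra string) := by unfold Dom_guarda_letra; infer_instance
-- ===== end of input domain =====

-- B replaces A's i>=3/i>=2/i>=1 index-arithmetic ladder by a one-pass rolling window
-- of the last three characters (objective: simpler; same O(n) cost).

-- ===== PORT A =====
-- one iteration of A's loop body (i is the current index into cs)
def stepA (cs : List Char) (L : List (List String)) (i : Nat) : List (List String) :=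
  if cs.getD i ' ' = 'a' ∨ cs.getD i ' ' = 'e' ∨ cs.getD i ' ' = 'i' ∨
     cs.getD i ' ' = 'o' ∨ cs.getD i ' ' = 'u' then
    if 3 ≤ i then
      L ++ [[(cs.getD (i-1) ' ').toString, (cs.getD (i-2) ' ').toString, (cs.getD (i-3) ' ').toString]]
    else if 2 ≤ i then
      L ++ [[(cs.getD (i-1) ' ').toString, (cs.getD (i-2) ' ').toString]]
    else if 1 ≤ i then
      L ++ [[(cs.getD (i-1) ' ').toString]]
    else L
  else L

def guarda_letra (string : String) : List (List String) :=
  (List.range string.toList.length).foldl (stepA string.toList) []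

-- ===== PORT B =====
-- one iteration of B's loop: maybe emit the reversed window, then push ch, keep last 3
def gbStep (st : List (List String) × List Char) (ch : Char) : List (List String) × List Char :=
  let L := if (ch ∈ ['a', 'e', 'i', 'o', 'u']) ∧ st.2 ≠ [] then
             st.1 ++ [st.2.reverse.map Char.toString]
           else st.1
  let b := st.2 ++ [ch]
  (L, b.drop (b.length - 3))

def guarda_letra_alt (string : String) : List (List String) :=
  (string.toList.foldl gbStep ([], [])).1

-- ===== PRECONDITION & SPEC =====
def Spec_guarda_letra (string : String) (out : List (List String)) : Prop := out = guarda_letra_alt string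
instance (string : String) (out : List (List String)) : Decidable (Spec_guarda_letra string out) := by unfold Spec_guarda_letra; infer_instance

-- ===== CLAIM (what is proved, stated in full; the proofs are below) =====
def Claim_equal_guarda_letra : Prop := ∀ (string : String), Dom_guarda_letra string → Spec_guarda_letra string (guarda_letra string)

-- ===== LEMMAS AND PROOFS =====

-- A's loop body at the final index, in terms of the preceding characters ds
lemma Astep_eq (ds : List Char) (c : Char) (L : List (List String)) :
    stepA (ds ++ [c]) L ds.length =
      if (c = 'a' ∨ c = 'e' ∨ c = 'i' ∨ c = 'o' ∨ c = 'u') ∧ ds ≠ [] then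
        L ++ [(ds.reverse.take 3).map Char.toString]
      else L := by
  obtain ⟨r, rfl⟩ : ∃ r, ds = r.reverse := ⟨ds.reverse, (List.reverse_reverse ds).symm⟩
  rcases r with _ | ⟨x, _ | ⟨y, _ | ⟨z, t⟩⟩⟩ <;>
    simp [stepA, List.take_succ_cons]

-- B's window update equals "last three of the new prefix" (r is the reversed old prefix)
lemma win_step (r : List Char) (c : Char) :
    ((r.take 3).reverse ++ [c]).drop (((r.take 3).reverse ++ [c]).length - 3) =
      ((c :: r).take 3).reverse := by
  rcases r with _ | ⟨x, _ | ⟨y, _ | ⟨z, t⟩⟩⟩ <;> simp [List.take_succ_cons]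

-- main invariant: B's fold carries A's output so far and the last-three window
lemma fold_pair (ds : List Char) :
    ds.foldl gbStep ([], []) =
      ((List.range ds.length).foldl (stepA ds) [], (ds.reverse.take 3).reverse) := by
  induction ds using List.reverseRecOn with
  | nil => simp
  | append_singleton ds c ih =>
    rw [List.foldl_append, ih]
    have hlen : (ds ++ [c]).length = ds.length + 1 := by simp
    rw [hlen, List.range_succ, List.foldl_append]
    have hcongr : (List.range ds.length).foldl (stepA (ds ++ [c])) [] =
        (List.range ds.length).foldl (stepA ds) [] := by
      apply PySem.List.foldl_congr_mem
      intro acc i hi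
      have hi' : i < ds.length := List.mem_range.mp hi
      unfold stepA
      rw [List.getD_append _ _ _ _ hi', List.getD_append _ _ _ _ (by omega),
          List.getD_append _ _ _ _ (by omega), List.getD_append _ _ _ _ (by omega)]
    rw [hcongr]
    refine Prod.ext ?_ ?_
    · simp only [List.foldl_cons, List.foldl_nil]
      rw [Astep_eq]
      have hne : ((ds.reverse.take 3).reverse ≠ []) ↔ ds ≠ [] := by
        simp [List.take_eq_nil_iff, List.reverse_eq_nil_iff]
      by_cases hv : (c = 'a' ∨ c = 'e' ∨ c = 'i' ∨ c = 'o' ∨ c = 'u') <;>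
        by_cases hd : ds = [] <;>
        simp [gbStep, hv, hd, hne, List.mem_cons]
    · show ((ds.reverse.take 3).reverse ++ [c]).drop _ = _
      rw [win_step]; simp

-- ===== VERDICT (by name: the statement is the Claim_ definition above) =====
theorem guarda_letra_spec : Claim_equal_guarda_letra := by
  intro string _
  show guarda_letra string = guarda_letra_alt string
  rw [guarda_letra, guarda_letra_alt, fold_pair]
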